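-- pv_equiv track=rewrite | github.com/miliar/Code_Jam_Webscraper | solutions_python/solutions_year15_round0_nr2/440.py | solve
-- ===== SOURCE A (Python) =====
-- import math
--
-- def solve(n_full, pies):
--     most_pie = max(pies)
--     num_pies = [0] * (most_pie+1)
--     for i in pies:
--         num_pies[i] += 1
--     least_min = most_pie
--     for size in range(2, most_pie):  # size of the target piles from 2 to most_pie-1
--         min_needed = size  # need size minutes to let them finish eating them
--         for i in range(size+1, most_pie+1):  # from pile of size+1 to pile of most_pie
--             min_needed += (math.ceil(i/size)-1) * num_pies[i]
--             #min_needed += num_pies[i]//size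
--         least_min = min(least_min, min_needed)
--     return least_min
-- ===== SOURCE B (Python) =====
-- def solve(n_full, pies):
--     M = max(pies)
--     best = M
--     for size in range(2, M):
--         best = min(best, size + sum((p - 1) // size for p in pies if p > size))
--     return best
-- ===== Notes on version B (the rewrite author's own statement) =====
-- stated objective: alternative
-- what changed: B drops A's size-(max+1) histogram and per-size scan over every possible pile size, computing each size's cost directly as size + sum over the actual pies of (p-1)//size (floor division replacing math.ceil), so the work per size is O(len(pies)) instead of O(max(pies)).
-- outside the precondition, e.g. on solve(0, [5, -1]): A returns 5, B returns 4
import Mathlib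
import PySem

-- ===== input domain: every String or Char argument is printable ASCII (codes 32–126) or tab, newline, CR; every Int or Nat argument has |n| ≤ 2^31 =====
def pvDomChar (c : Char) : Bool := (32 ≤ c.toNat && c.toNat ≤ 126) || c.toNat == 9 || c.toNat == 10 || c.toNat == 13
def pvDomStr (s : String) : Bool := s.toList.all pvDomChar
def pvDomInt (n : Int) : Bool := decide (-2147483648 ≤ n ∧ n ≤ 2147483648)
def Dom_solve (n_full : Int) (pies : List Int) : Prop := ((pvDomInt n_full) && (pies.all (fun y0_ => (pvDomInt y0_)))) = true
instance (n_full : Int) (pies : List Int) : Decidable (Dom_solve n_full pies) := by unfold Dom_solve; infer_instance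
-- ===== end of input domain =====

-- B replaces A's size-(max+1) histogram and per-possible-size inner scan by a direct per-pie sum
-- size + Σ (p-1)//size over the pies larger than size; the return values are proved equal on Pre_.

-- ===== PORT A =====
-- math.ceil(i/size) is ported as integer ceiling division -((-i) // size); exact for the
-- 0 < i, size ≤ 2^31 reached here, where the float quotient's rounding cannot cross an integer.
def solve (n_full : Int) (pies : List Int) : Int :=
  match PySem.List.max? pies (fun x => x) with
  | none => 0  -- Python raises ValueError on max([]); excluded by Pre_solve
  | some mostPie =>
    let numPies0 : List Int := List.replicate (mostPie + 1).toNat 0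
    let numPies := pies.foldl
      (fun c i => PySem.List.pySetD c i (PySem.List.pyGetD c i 0 + 1)) numPies0
    (PySem.List.pyRange 2 mostPie 1).foldl
      (fun leastMin size =>
        min leastMin
          ((PySem.List.pyRange (size + 1) (mostPie + 1) 1).foldl
            (fun minNeeded i =>
              minNeeded + (-(PySem.Int.floordiv (-i) size) - 1) * PySem.List.pyGetD numPies i 0)
            size))
      mostPie

-- ===== PORT B =====
def solve_alt (n_full : Int) (pies : List Int) : Int :=
  match PySem.List.max? pies (fun x => x) with
  | none => 0  -- Python raises ValueError on max([]); excluded by Pre_solve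
  | some m =>
    (PySem.List.pyRange 2 m 1).foldl
      (fun best size =>
        min best
          (size + pies.foldl
            (fun acc p => if size < p then acc + PySem.Int.floordiv (p - 1) size else acc) 0))
      m

-- ===== PRECONDITION & SPEC =====
-- Pre_ excludes the empty list (A's max([]) raises ValueError) and lists with a negative pie size,
-- the natural domain being nonnegative sizes: on a negative size A either raises IndexError or
-- silently counts the pie at a wrapped-around histogram slot.
def Pre_solve (n_full : Int) (pies : List Int) : Prop :=
  pies ≠ [] ∧ ∀ p ∈ pies, 0 ≤ p
instance (n_full : Int) (pies : List Int) : Decidable (Pre_solve n_full pies) := by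
  unfold Pre_solve; infer_instance

def pvWitness_solve : Int × List Int := (3, [1, 2, 5, 5])

def Spec_solve (n_full : Int) (pies : List Int) (out : Int) : Prop := out = solve_alt n_full pies
instance (n_full : Int) (pies : List Int) (out : Int) : Decidable (Spec_solve n_full pies out) := by
  unfold Spec_solve; infer_instance

-- ===== CLAIM (what is proved, stated in full; the proofs are below) =====
def Claim_equal_solve : Prop := ∀ (n_full : Int) (pies : List Int),
  Dom_solve n_full pies → Pre_solve n_full pies → Spec_solve n_full pies (solve n_full pies)

-- ===== LEMMAS AND PROOFS =====

-- ceiling-division identity used by B: ceil(i/s) - 1 = (i-1) // s for s > 0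
lemma ceil_sub_one_eq (i s : Int) (hs : 0 < s) :
    -(PySem.Int.floordiv (-i) s) - 1 = PySem.Int.floordiv (i - 1) s := by
  have hq : PySem.Int.floordiv (i - 1) s = PySem.Int.floordiv (i - 1) s := rfl
  obtain ⟨h1, h2⟩ := (PySem.Int.floordiv_eq_iff_of_pos hs).mp hq
  have : -PySem.Int.floordiv (-i) s = PySem.Int.floordiv (i - 1) s + 1 := by
    rw [PySem.Int.neg_floordiv_neg_eq_iff_of_pos hs]
    constructor <;> nlinarith
  omega

lemma sum_ite_nodup (R : List Int) (g : Int → Int) (p : Int) (h : R.Nodup) :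
    (R.map (fun i => if i = p then g i else 0)).sum = if p ∈ R then g p else 0 := by
  induction R with
  | nil => simp
  | cons r R ih =>
    rcases List.nodup_cons.mp h with ⟨hr, hR⟩
    simp only [List.map_cons, List.sum_cons, ih hR, List.mem_cons]
    by_cases hpr : r = p
    · subst hpr
      simp [hr]
    · simp [hpr, Ne.symm hpr]

-- a weighted sum over a duplicate-free index list against multiplicities is a per-element sum
lemma sum_count_eq (R : List Int) (hR : R.Nodup) (g : Int → Int) (l : List Int) :
    (R.map (fun i => g i * (l.count i : Int))).sum
      = (l.map (fun p => if p ∈ R then g p else 0)).sum := by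
  induction l with
  | nil => simp
  | cons p l ih =>
    have hcc : ∀ i : Int, ((p :: l).count i : Int) = (l.count i : Int) + (if i = p then 1 else 0) := by
      intro i
      rw [List.count_cons]
      by_cases h : i = p
      · subst h; push_cast; simp
      · simp [h, Ne.symm h]
    calc (R.map (fun i => g i * ((p :: l).count i : Int))).sum
        = (R.map (fun i => g i * (l.count i : Int) + (if i = p then g i else 0))).sum := by
          apply congrArg
          apply List.map_congr_left
          intro i _
          rw [hcc i]
          by_cases h : i = p <;> simp [h] <;> ring
      _ = (R.map (fun i => g i * (l.count i : Int))).sum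
            + (R.map (fun i => if i = p then g i else 0)).sum := by
          rw [PySem.List.sum_map_add_int]
      _ = (l.map (fun q => if q ∈ R then g q else 0)).sum + (if p ∈ R then g p else 0) := by
          rw [ih, sum_ite_nodup R g p hR]
      _ = ((p :: l).map (fun q => if q ∈ R then g q else 0)).sum := by
          simp [List.map_cons]; ring

-- A's histogram loop computes multiplicities
lemma hist_foldl (M : Int) (l : List Int) (c : List Int)
    (hl : ∀ p ∈ l, 0 ≤ p ∧ p ≤ M) (hc : c.length = (M + 1).toNat)
    (i : Int) (hi0 : 0 ≤ i) (hiM : i ≤ M) :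
    PySem.List.pyGetD
      (l.foldl (fun c j => PySem.List.pySetD c j (PySem.List.pyGetD c j 0 + 1)) c) i 0
      = PySem.List.pyGetD c i 0 + (l.count i : Int) := by
  induction l generalizing c with
  | nil => simp
  | cons p l ih =>
    obtain ⟨hp0, hpM⟩ := hl p (by simp)
    have hlen : (PySem.List.pySetD c p (PySem.List.pyGetD c p 0 + 1)).length = (M + 1).toNat := by
      rw [PySem.List.length_pySetD]; exact hc
    have hplt : p.toNat < c.length := by omega
    have hkey : PySem.List.pyGetD (PySem.List.pySetD c p (PySem.List.pyGetD c p 0 + 1)) i 0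
        = PySem.List.pyGetD c i 0 + (if i = p then 1 else 0) := by
      have hp' : p = ((p.toNat : Nat) : Int) := by omega
      have hi' : i = ((i.toNat : Nat) : Int) := by omega
      rw [hp', hi', PySem.List.pyGetD_pySetD_natCast c p.toNat i.toNat _ 0 (by omega)]
      by_cases h : i = p
      · have ht : i.toNat = p.toNat := by omega
        simp [ht, ← hp']
      · rw [if_neg (show ¬ i.toNat = p.toNat by omega),
            if_neg (show ¬((i.toNat : Int) = (p.toNat : Int)) by omega)]; ring
    rw [List.foldl_cons, ih _ (fun q hq => hl q (by simp [hq])) hlen, hkey, List.count_cons]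
    by_cases h : i = p
    · subst h; push_cast; simp; ring
    · simp [h, Ne.symm h]

-- the two ports agree on Pre_
lemma solve_eq_alt (n_full : Int) (pies : List Int)
    (hne : pies ≠ []) (hpos : ∀ p ∈ pies, 0 ≤ p) :
    solve n_full pies = solve_alt n_full pies := by
  cases hmax : PySem.List.max? pies (fun x => x) with
  | none => exact absurd ((PySem.List.max?_eq_none_iff pies _).mp hmax) hne
  | some M =>
    have hle : ∀ p ∈ pies, p ≤ M := PySem.List.max?_isMax hmax
    have hall : ∀ p ∈ pies, 0 ≤ p ∧ p ≤ M := fun p hp => ⟨hpos p hp, hle p hp⟩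
    simp only [solve, solve_alt, hmax]
    apply PySem.List.foldl_congr_mem
    intro acc s hs
    rw [PySem.List.mem_pyRange_one] at hs
    have hs2 : (2:Int) ≤ s := hs.1
    congr 1
    have hcnt : ∀ i : Int, 0 ≤ i → i ≤ M →
        PySem.List.pyGetD
          (pies.foldl (fun c j => PySem.List.pySetD c j (PySem.List.pyGetD c j 0 + 1))
            (List.replicate (M + 1).toNat 0)) i 0 = (pies.count i : Int) := by
      intro i h0 hM
      rw [hist_foldl M pies _ hall (by simp) i h0 hM,
          PySem.List.pyGetD_of_nonneg _ _ h0]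
      simp [List.getD]
    rw [PySem.List.foldl_add, PySem.List.foldl_congr_mem pies _
          (fun acc p => acc + (if s < p then PySem.Int.floordiv (p - 1) s else 0)) 0
          (by intro acc p _; by_cases h : s < p <;> simp [h]),
        PySem.List.foldl_add, zero_add]
    congr 1
    calc ((PySem.List.pyRange (s + 1) (M + 1) 1).map
            (fun i => (-(PySem.Int.floordiv (-i) s) - 1) *
              PySem.List.pyGetD
                (pies.foldl (fun c j => PySem.List.pySetD c j (PySem.List.pyGetD c j 0 + 1))
                  (List.replicate (M + 1).toNat 0)) i 0)).sum
        = ((PySem.List.pyRange (s + 1) (M + 1) 1).map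
            (fun i => (-(PySem.Int.floordiv (-i) s) - 1) * (pies.count i : Int))).sum := by
          apply congrArg
          apply List.map_congr_left
          intro i hi
          rw [PySem.List.mem_pyRange_one] at hi
          rw [hcnt i (by omega) (by omega)]
      _ = (pies.map (fun p => if p ∈ PySem.List.pyRange (s + 1) (M + 1) 1
              then -(PySem.Int.floordiv (-p) s) - 1 else 0)).sum := by
          exact sum_count_eq _ (PySem.List.nodup_pyRange_one _ _) _ pies
      _ = (pies.map (fun p => if s < p then PySem.Int.floordiv (p - 1) s else 0)).sum := by
          apply congrArg
          apply List.map_congr_left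
          intro p hp
          have hpM := hle p hp
          by_cases h : s < p
          · rw [if_pos (PySem.List.mem_pyRange_one.mpr (by omega)), if_pos h,
                ceil_sub_one_eq p s (by omega)]
          · rw [if_neg (by rw [PySem.List.mem_pyRange_one]; omega), if_neg h]

-- ===== VERDICT (by name: the statement is the Claim_ definition above) =====
theorem solve_spec : Claim_equal_solve := by
  intro n_full pies _ hpre
  unfold Spec_solve
  exact solve_eq_alt n_full pies hpre.1 hpre.2
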